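-- pv_equiv track=rewrite | github.com/PierreMartou/CIT-SAT-Implementation | ResultRefining.py | numberOfChangements
-- ===== SOURCE A (Python) =====
-- def numberOfChangements(testSuite, allContexts, newNodes=None):
--     contexts = allContexts.copy()
--     if newNodes is not None:
--         contexts = [context for context in allContexts if context in newNodes]
--     score = 0
--     prevTestCase = testSuite[0]
--     for testCase in testSuite:
--         score += sum([1 for context in contexts if testCase[context] < 0 and prevTestCase[context] > 0])
--         score += sum([1 for context in contexts if testCase[context] > 0 and prevTestCase[context] < 0])
--         prevTestCase = testCase
--
--     return score
-- ===== SOURCE B (Python) =====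
-- def numberOfChangements(testSuite, allContexts, newNodes=None):
--     contexts = allContexts.copy()
--     if newNodes is not None:
--         contexts = [context for context in allContexts if context in newNodes]
--     score = 0
--     for context in contexts:
--         vals = [tc[context] for tc in testSuite]
--         score += sum(1 for i in range(1, len(vals)) if vals[i - 1] * vals[i] < 0)
--     return score
-- ===== Notes on version B (the rewrite author's own statement) =====
-- stated objective: alternative
-- what changed: B iterates context-major: for each context it extracts the per-context series across the test suite and counts adjacent pairs with a negative product (strict sign flip), instead of A's test-case-major loop that carries a previous test case and counts two filtered comprehensions per step.
import Mathlib
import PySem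

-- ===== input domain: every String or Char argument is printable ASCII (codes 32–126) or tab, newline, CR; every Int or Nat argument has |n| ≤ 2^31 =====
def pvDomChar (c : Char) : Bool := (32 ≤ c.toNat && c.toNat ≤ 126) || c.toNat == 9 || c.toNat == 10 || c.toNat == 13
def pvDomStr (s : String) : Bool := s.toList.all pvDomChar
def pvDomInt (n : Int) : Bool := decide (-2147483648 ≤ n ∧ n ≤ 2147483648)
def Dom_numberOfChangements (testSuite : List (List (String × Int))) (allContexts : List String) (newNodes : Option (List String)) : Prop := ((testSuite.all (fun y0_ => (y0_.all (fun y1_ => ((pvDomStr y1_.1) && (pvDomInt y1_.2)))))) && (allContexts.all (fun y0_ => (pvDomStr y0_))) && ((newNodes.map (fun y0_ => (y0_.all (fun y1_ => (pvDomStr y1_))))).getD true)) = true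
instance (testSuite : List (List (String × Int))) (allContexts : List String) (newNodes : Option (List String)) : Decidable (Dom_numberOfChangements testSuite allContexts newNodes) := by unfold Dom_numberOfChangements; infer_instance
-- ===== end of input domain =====

-- B iterates context-major (per-context series, counting adjacent pairs with negative product)
-- instead of A's test-case-major loop carrying a previous test case; same cost, different decomposition.
-- On an empty testSuite Python A raises IndexError (excluded by Pre_) while Python B returns 0.

-- shared primitive: Python's `testCase[context]` (dict lookup; default never used inside Pre_)
def pvLookup (tc : List (String × Int)) (c : String) : Int :=
  PySem.Dict.getD ⟨tc⟩ c 0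

-- ===== PORT A =====
def numberOfChangements (testSuite : List (List (String × Int))) (allContexts : List String) (newNodes : Option (List String)) : Int :=
  let contexts :=
    match newNodes with
    | none => allContexts
    | some ns => allContexts.filter (fun c => ns.contains c)
  match testSuite with
  | [] => 0   -- Python raises IndexError at testSuite[0]; excluded by Pre_
  | t0 :: _ =>
    (testSuite.foldl
      (fun (st : Int × List (String × Int)) testCase =>
        let s1 := st.1 + ((contexts.filter (fun c => pvLookup testCase c < 0 && pvLookup st.2 c > 0)).length : Int)
        let s2 := s1 + ((contexts.filter (fun c => pvLookup testCase c > 0 && pvLookup st.2 c < 0)).length : Int)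
        (s2, testCase))
      (0, t0)).1

-- ===== PORT B =====
def numberOfChangements_alt (testSuite : List (List (String × Int))) (allContexts : List String) (newNodes : Option (List String)) : Int :=
  let contexts :=
    match newNodes with
    | none => allContexts
    | some ns => allContexts.filter (fun c => ns.contains c)
  contexts.foldl
    (fun score context =>
      let vals := testSuite.map (fun tc => pvLookup tc context)
      score + (((PySem.List.pyRange 1 (vals.length : Int)).filter
        (fun i => decide (PySem.List.pyGetD vals (i - 1) 0 * PySem.List.pyGetD vals i 0 < 0))).length : Int))
    0

-- ===== PRECONDITION & SPEC =====
-- Pre_ excludes exactly the inputs where Python A raises: an empty testSuite (IndexError) and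
-- test cases missing a selected context key (KeyError).
def Pre_numberOfChangements (testSuite : List (List (String × Int))) (allContexts : List String) (newNodes : Option (List String)) : Prop :=
  testSuite ≠ [] ∧
  ∀ tc ∈ testSuite, ∀ c ∈ allContexts,
    c ∈ newNodes.getD allContexts → c ∈ tc.map Prod.fst

instance (testSuite : List (List (String × Int))) (allContexts : List String) (newNodes : Option (List String)) : Decidable (Pre_numberOfChangements testSuite allContexts newNodes) := by
  unfold Pre_numberOfChangements; infer_instance

def pvWitness_numberOfChangements : (List (List (String × Int))) × List String × Option (List String) :=
  ([[("a", 2), ("b", -1)], [("a", -3), ("b", 1)]], ["a", "b"], none)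

def Spec_numberOfChangements (testSuite : List (List (String × Int))) (allContexts : List String) (newNodes : Option (List String)) (out : Int) : Prop := out = numberOfChangements_alt testSuite allContexts newNodes
instance (testSuite : List (List (String × Int))) (allContexts : List String) (newNodes : Option (List String)) (out : Int) : Decidable (Spec_numberOfChangements testSuite allContexts newNodes out) := by unfold Spec_numberOfChangements; infer_instance

-- ===== CLAIM (what is proved, stated in full; the proofs are below) =====
def Claim_equal_numberOfChangements : Prop := ∀ (testSuite : List (List (String × Int))) (allContexts : List String) (newNodes : Option (List String)), Dom_numberOfChangements testSuite allContexts newNodes → Pre_numberOfChangements testSuite allContexts newNodes → Spec_numberOfChangements testSuite allContexts newNodes (numberOfChangements testSuite allContexts newNodes)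


-- ===== LEMMAS AND PROOFS =====

-- the per-pair, per-context 0/1 contribution both programs count
def pvFlip (p t : List (String × Int)) (c : String) : Int :=
  if pvLookup p c * pvLookup t c < 0 then 1 else 0

-- per-pair contribution of A's loop body
def pvCA (contexts : List String) (p t : List (String × Int)) : Int :=
  ((contexts.filter (fun c => pvLookup t c < 0 && pvLookup p c > 0)).length : Int)
  + ((contexts.filter (fun c => pvLookup t c > 0 && pvLookup p c < 0)).length : Int)

lemma pvCA_eq_sum (contexts : List String) (p t : List (String × Int)) :
    pvCA contexts p t = (contexts.map (fun c => pvFlip p t c)).sum := by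
  unfold pvCA
  rw [← List.countP_eq_length_filter, ← List.countP_eq_length_filter,
      ← PySem.List.sum_map_ite_one_zero, ← PySem.List.sum_map_ite_one_zero,
      ← PySem.List.sum_map_add_int]
  apply congrArg
  apply List.map_congr_left
  intro c _
  unfold pvFlip
  simp only [Bool.and_eq_true, decide_eq_true_eq, mul_neg_iff]
  split_ifs <;> omega

lemma pvCA_self (contexts : List String) (t : List (String × Int)) :
    pvCA contexts t t = 0 := by
  unfold pvCA
  have h1 : contexts.filter (fun c => pvLookup t c < 0 && pvLookup t c > 0) = [] := by
    apply List.filter_eq_nil_iff.mpr; intro c _; simp; omega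
  have h2 : contexts.filter (fun c => pvLookup t c > 0 && pvLookup t c < 0) = [] := by
    apply List.filter_eq_nil_iff.mpr; intro c _; simp; omega
  rw [h1, h2]; simp

-- A's fold, characterised over the (prev, cur) pairs
lemma pvFoldA (contexts : List String) :
    ∀ (l : List (List (String × Int))) (s : Int) (p : List (String × Int)),
      (l.foldl
        (fun (st : Int × List (String × Int)) testCase =>
          (st.1 + ((contexts.filter (fun c => pvLookup testCase c < 0 && pvLookup st.2 c > 0)).length : Int)
                + ((contexts.filter (fun c => pvLookup testCase c > 0 && pvLookup st.2 c < 0)).length : Int),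
           testCase))
        (s, p)).1
      = s + (((p :: l).zip l).map (fun q => pvCA contexts q.1 q.2)).sum := by
  intro l
  induction l with
  | nil => intro s p; simp
  | cons t ls ih =>
    intro s p
    simp only [List.foldl_cons]
    rw [ih]
    simp only [List.zip_cons_cons, List.map_cons, List.sum_cons]
    unfold pvCA
    ring

-- index-based adjacent-pair sum equals the zip-based one
lemma pvZipSum (F : Int → Int → Int) :
    ∀ (vals : List Int),
      ((List.range (vals.length - 1)).map (fun k => F (vals.getD k 0) (vals.getD (k + 1) 0))).sum
      = ((vals.zip vals.tail).map (fun q => F q.1 q.2)).sum := by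
  intro vals
  induction vals with
  | nil => simp
  | cons a tl ih =>
    cases tl with
    | nil => simp
    | cons b rest =>
      have hlen : (a :: b :: rest).length - 1 = (b :: rest).length - 1 + 1 := by
        simp
      rw [hlen, List.range_succ_eq_map]
      simp only [List.map_cons, List.sum_cons, List.map_map]
      have hmap : (List.range ((b :: rest).length - 1)).map
                ((fun k => F ((a :: b :: rest).getD k 0) ((a :: b :: rest).getD (k + 1) 0)) ∘ Nat.succ)
            = (List.range ((b :: rest).length - 1)).map
                (fun k => F ((b :: rest).getD k 0) ((b :: rest).getD (k + 1) 0)) := by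
        apply List.map_congr_left
        intro k _
        simp [List.getD]
      rw [hmap, ih]
      simp [List.zip_cons_cons]

-- B's inner count over range(1, len(vals)) as a zip-based sum
lemma pvInnerB (vals : List Int) :
    (((PySem.List.pyRange 1 (vals.length : Int)).filter
        (fun i => decide (PySem.List.pyGetD vals (i - 1) 0 * PySem.List.pyGetD vals i 0 < 0))).length : Int)
    = ((vals.zip vals.tail).map (fun q => if q.1 * q.2 < 0 then (1 : Int) else 0)).sum := by
  rw [PySem.List.pyRange_one]
  have hn : ((vals.length : Int) - 1).toNat = vals.length - 1 := by omega
  rw [hn, List.filter_map, List.length_map, ← List.countP_eq_length_filter,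
      ← PySem.List.sum_map_ite_one_zero]
  rw [← pvZipSum (fun a b => if a * b < 0 then (1 : Int) else 0) vals]
  apply congrArg
  apply List.map_congr_left
  intro k hk
  have hk' : k < vals.length - 1 := List.mem_range.mp hk
  have h1 : (1 : Int) + (k : Int) - 1 = ((k : ℕ) : Int) := by ring
  have h2 : (1 : Int) + (k : Int) = ((k + 1 : ℕ) : Int) := by push_cast; ring
  simp only [Function.comp, h2, PySem.List.pyGetD_natCast]
  simp

-- per context, B's zip over the mapped value series is a zip over test-case pairs
lemma pvZipMap (t0 : List (String × Int)) (rest : List (List (String × Int))) (context : String) :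
    ((((t0 :: rest).map (fun tc => pvLookup tc context)).zip
        (((t0 :: rest).map (fun tc => pvLookup tc context)).tail)).map
      (fun q => if q.1 * q.2 < 0 then (1 : Int) else 0)).sum
    = (((t0 :: rest).zip rest).map (fun q => pvFlip q.1 q.2 context)).sum := by
  have htail : ((t0 :: rest).map (fun tc => pvLookup tc context)).tail
      = rest.map (fun tc => pvLookup tc context) := by simp
  rw [htail, List.zip_map, List.map_map]
  apply congrArg
  apply List.map_congr_left
  intro q _
  simp [pvFlip, Prod.map]

-- double-sum exchange
lemma pvSumComm {α β : Type} (f : α → β → Int) :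
    ∀ (l1 : List α) (l2 : List β),
      (l1.map (fun a => (l2.map (f a)).sum)).sum
      = (l2.map (fun b => (l1.map (fun a => f a b)).sum)).sum := by
  intro l1
  induction l1 with
  | nil => intro l2; simp
  | cons a tl ih =>
    intro l2
    simp only [List.map_cons, List.sum_cons, ih]
    rw [← PySem.List.sum_map_add_int]

-- the two loop shapes agree for ANY selected context list and nonempty test suite
lemma pvMain (contexts : List String) (t0 : List (String × Int)) (rest : List (List (String × Int))) :
    ((t0 :: rest).foldl
      (fun (st : Int × List (String × Int)) testCase =>
        (st.1 + ((contexts.filter (fun c => pvLookup testCase c < 0 && pvLookup st.2 c > 0)).length : Int)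
              + ((contexts.filter (fun c => pvLookup testCase c > 0 && pvLookup st.2 c < 0)).length : Int),
         testCase))
      (0, t0)).1
    = contexts.foldl
        (fun score context =>
          score + (((PySem.List.pyRange 1 (((t0 :: rest).map (fun tc => pvLookup tc context)).length : Int)).filter
            (fun i => decide (PySem.List.pyGetD ((t0 :: rest).map (fun tc => pvLookup tc context)) (i - 1) 0
                * PySem.List.pyGetD ((t0 :: rest).map (fun tc => pvLookup tc context)) i 0 < 0))).length : Int))
        0 := by
  rw [pvFoldA contexts (t0 :: rest) 0 t0, PySem.List.foldl_add]
  simp only [pvInnerB]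
  simp only [pvZipMap]
  simp only [List.zip_cons_cons, List.map_cons, List.sum_cons, pvCA_self, zero_add]
  rw [← pvSumComm (fun (q : List (String × Int) × List (String × Int)) c => pvFlip q.1 q.2 c)
      ((t0 :: rest).zip rest) contexts]
  apply congrArg
  apply List.map_congr_left
  intro q _
  exact pvCA_eq_sum contexts q.1 q.2

theorem numberOfChangements_spec : Claim_equal_numberOfChangements := by
  intro ts allC nn _hdom hpre
  unfold Spec_numberOfChangements numberOfChangements numberOfChangements_alt
  cases ts with
  | nil => exact absurd rfl hpre.1
  | cons t0 rest =>
    cases nn with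
    | none => exact pvMain allC t0 rest
    | some ns => exact pvMain (allC.filter (fun c => ns.contains c)) t0 rest
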